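-- pv_equiv track=rewrite | github.com/Smemon19/Safety-project | scripts/process_design_spec.py | _extract_project_meta
-- ===== SOURCE A (Python) =====
-- from typing import Any, Dict, List, Optional, Tuple
--
-- def _extract_project_meta(text: str) -> Dict[str, str]:
--     """Heuristic extraction of project metadata from free text.
--
--     Looks for lines like:
--       Project: NAME
--       Project Name: NAME
--       Project Number: 1234
--       Location: CITY, STATE
--       Owner: X
--       GC: Y
--     """
--     meta = {
--         "project_name": "",
--         "project_number": "",
--         "location": "",
--         "owner": "",
--         "gc": "",
--     }
--     lines = (text or "").splitlines()
--     for raw in lines: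
--         line = raw.strip()
--         low = line.lower()
--         def _val(prefix: str) -> str:
--             return line.split(":", 1)[1].strip() if ":" in line else line[len(prefix):].strip()
--         if low.startswith("project name:") or low.startswith("project:"):
--             meta["project_name"] = _val("project name:") if ":" in line.lower() else _val("project:")
--         elif low.startswith("project number:") or low.startswith("project #:") or low.startswith("project no:"):
--             meta["project_number"] = _val("project number:")
--         elif low.startswith("location:"):
--             meta["location"] = _val("location:")
--         elif low.startswith("owner:"):
--             meta["owner"] = _val("owner:")
--         elif low.startswith("gc:") or low.startswith("general contractor:"):
--             meta["gc"] = _val("gc:") if low.startswith("gc:") else _val("general contractor:")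
--     return meta
-- ===== SOURCE B (Python) =====
-- # Split-first re-implementation: cut each line at its first colon and look the
-- # exact (lowercased) head up in a hash map, instead of scanning prefix patterns.
-- _KEY_BY_HEAD = {
--     "project name": "project_name",
--     "project": "project_name",
--     "project number": "project_number",
--     "project #": "project_number",
--     "project no": "project_number",
--     "location": "location",
--     "owner": "owner",
--     "gc": "gc",
--     "general contractor": "gc",
-- }
--
-- def _extract_project_meta(text):
--     meta = {
--         "project_name": "",
--         "project_number": "",
--         "location": "",
--         "owner": "",
--         "gc": "",
--     }
--     for raw in (text or "").splitlines():
--         parts = raw.strip().split(":", 1)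
--         if len(parts) == 2:
--             key = _KEY_BY_HEAD.get(parts[0].lower())
--             if key is not None:
--                 meta[key] = parts[1].strip()
--     return meta
-- ===== Notes on version B (the rewrite author's own statement) =====
-- stated objective: alternative
-- what changed: Instead of A's ladder of nine prefix startswith-tests per line, B splits each stripped line at its first colon and looks the exact lowercased head up in a hash map (correct because every prefix A tests ends at that first colon, so matching a prefix is the same as the head equalling it).
import Mathlib
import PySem

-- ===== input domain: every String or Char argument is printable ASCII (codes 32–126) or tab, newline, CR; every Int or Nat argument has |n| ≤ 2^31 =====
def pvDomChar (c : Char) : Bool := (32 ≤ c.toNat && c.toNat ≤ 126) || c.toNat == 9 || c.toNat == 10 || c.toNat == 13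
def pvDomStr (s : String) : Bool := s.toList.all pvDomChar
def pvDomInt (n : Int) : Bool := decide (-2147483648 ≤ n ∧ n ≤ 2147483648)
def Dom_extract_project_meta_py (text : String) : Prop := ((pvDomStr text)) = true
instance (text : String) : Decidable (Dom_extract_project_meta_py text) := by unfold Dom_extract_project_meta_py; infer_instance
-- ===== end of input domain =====

-- B cuts each line at its first colon and looks the exact lowercased head up in a
-- hash map, instead of A's prefix-pattern ladder; objective: simpler (same cost).

-- ===== PORT A =====
-- _val(prefix): the closure inside A's loop
def pvValA (line : String) (pre : String) : String :=
  if PySem.Str.isIn ":" line then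
    PySem.Str.strip (((PySem.Str.splitMax? line ":" 1).getD [])[1]?.getD "")
  else
    PySem.Str.strip (PySem.Str.slice line (some (PySem.Str.len pre)) none)

-- the body of A's 'for raw in lines' loop
def pvStepA (md : PySem.Dict String String) (raw : String) : PySem.Dict String String :=
  let line := PySem.Str.strip raw
  let low := PySem.Str.lower line
  if PySem.Str.startswith low "project name:" || PySem.Str.startswith low "project:" then
    md.insert "project_name"
      (if PySem.Str.isIn ":" (PySem.Str.lower line) then pvValA line "project name:" else pvValA line "project:")
  else if PySem.Str.startswith low "project number:" || PySem.Str.startswith low "project #:" || PySem.Str.startswith low "project no:" then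
    md.insert "project_number" (pvValA line "project number:")
  else if PySem.Str.startswith low "location:" then
    md.insert "location" (pvValA line "location:")
  else if PySem.Str.startswith low "owner:" then
    md.insert "owner" (pvValA line "owner:")
  else if PySem.Str.startswith low "gc:" || PySem.Str.startswith low "general contractor:" then
    md.insert "gc"
      (if PySem.Str.startswith low "gc:" then pvValA line "gc:" else pvValA line "general contractor:")
  else md

def extract_project_meta_py (text : String) : List (String × String) :=
  let md : PySem.Dict String String :=
    PySem.Dict.ofList [("project_name", ""), ("project_number", ""), ("location", ""), ("owner", ""), ("gc", "")]
  ((PySem.Str.splitlines text).foldl pvStepA md).items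

-- ===== PORT B =====
-- Source B's _KEY_BY_HEAD map: exact lowercased head (text before the first colon) → meta key
def pvKeyByHead : PySem.Dict String String :=
  PySem.Dict.ofList
    [("project name", "project_name"), ("project", "project_name"),
     ("project number", "project_number"), ("project #", "project_number"), ("project no", "project_number"),
     ("location", "location"), ("owner", "owner"),
     ("gc", "gc"), ("general contractor", "gc")]

-- the body of Source B's loop: split at the first colon, then one dict lookup
def pvStepB (md : PySem.Dict String String) (raw : String) : PySem.Dict String String :=
  match (PySem.Str.splitMax? (PySem.Str.strip raw) ":" 1).getD [] with
  | [h, r] =>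
    match pvKeyByHead.get? (PySem.Str.lower h) with
    | some k => md.insert k (PySem.Str.strip r)
    | none => md
  | _ => md

def extract_project_meta_py_alt (text : String) : List (String × String) :=
  let md : PySem.Dict String String :=
    PySem.Dict.ofList [("project_name", ""), ("project_number", ""), ("location", ""), ("owner", ""), ("gc", "")]
  ((PySem.Str.splitlines text).foldl pvStepB md).items

-- ===== PRECONDITION & SPEC =====
def Spec_extract_project_meta_py (text : String) (out : List (String × String)) : Prop := out = extract_project_meta_py_alt text
instance (text : String) (out : List (String × String)) : Decidable (Spec_extract_project_meta_py text out) := by unfold Spec_extract_project_meta_py; infer_instance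

-- ===== CLAIM (what is proved, stated in full; the proofs are below) =====
def Claim_equal_extract_project_meta_py : Prop := ∀ (text : String), Dom_extract_project_meta_py text → Spec_extract_project_meta_py text (extract_project_meta_py text)

-- ===== LEMMAS AND PROOFS =====

-- lowercasing an ASCII char never produces ':'
theorem pv_lowerChar_eq_colon {c : Char} (h : PySem.Chars.lowerChar c = ':') : c = ':' := by
  unfold PySem.Chars.lowerChar at h
  split at h
  · exfalso
    rename_i hu
    unfold PySem.Chars.isupper at hu
    simp only [Bool.and_eq_true, decide_eq_true_eq] at hu
    have hA : 65 ≤ c.toNat := hu.1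
    have hZ : c.toNat ≤ 90 := hu.2
    have h1 : (Char.ofNat (c.toNat + 32)).toNat = (':' : Char).toNat := by rw [h]
    rw [Char.toNat_ofNat] at h1
    have hv : Nat.isValidChar (c.toNat + 32) := Or.inl (by omega)
    rw [if_pos hv] at h1
    have hcol : (':' : Char).toNat = 58 := rfl
    omega
  · exact h

theorem pv_colon_notmem_lower {a : List Char} (ha : ':' ∉ a) : ':' ∉ PySem.Chars.lower a := by
  intro h
  rw [PySem.Chars.lower, List.mem_map] at h
  obtain ⟨c, hc, hc'⟩ := h
  exact ha ((pv_lowerChar_eq_colon hc') ▸ hc)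

theorem go_m0 (fuel : Nat) (l cur : List Char) (acc : List (List Char)) :
    PySem.Chars.splitOnMax.go [':'] fuel 0 l cur acc = ((cur.reverse ++ l) :: acc).reverse := by
  rw [PySem.Chars.splitOnMax.go.eq_def]
  cases fuel with
  | zero => simp
  | succ f => cases l with
    | nil => simp
    | cons c t => simp

theorem go_m1_nocolon (l : List Char) (h : ':' ∉ l) (fuel : Nat) (cur : List Char) (acc : List (List Char)) :
    PySem.Chars.splitOnMax.go [':'] fuel 1 l cur acc = ((cur.reverse ++ l) :: acc).reverse := by
  induction l generalizing fuel cur with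
  | nil =>
    rw [PySem.Chars.splitOnMax.go.eq_def]
    cases fuel with
    | zero => simp
    | succ f => simp
  | cons c t ih =>
    rw [PySem.Chars.splitOnMax.go.eq_def]
    cases fuel with
    | zero => simp
    | succ f =>
      have hc : c ≠ ':' := fun hh => h (hh ▸ List.mem_cons_self ..)
      have hp : [':'].isPrefixOf (c :: t) = false := by
        simp [List.isPrefixOf]; exact fun hh => (hc hh.symm).elim
      simp only [hp, Bool.false_eq_true, if_false, if_neg (by omega : ¬ (1 = 0))]
      rw [ih (fun hh => h (List.mem_cons_of_mem _ hh)) f (c :: cur)]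
      simp
  -- note: the fuel = 0 branch of go returns the same value here, so no fuel bound is needed

theorem go_m1_colon (a : List Char) (ha : ':' ∉ a) (b : List Char) (fuel : Nat)
    (hf : a.length < fuel) (cur : List Char) (acc : List (List Char)) :
    PySem.Chars.splitOnMax.go [':'] fuel 1 (a ++ ':' :: b) cur acc
      = acc.reverse ++ [cur.reverse ++ a, b] := by
  induction a generalizing fuel cur with
  | nil =>
    cases fuel with
    | zero => omega
    | succ f =>
      rw [PySem.Chars.splitOnMax.go.eq_def]
      have hpre : [':'].isPrefixOf (':' :: b) = true := by simp [List.isPrefixOf]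
      simp only [List.nil_append, hpre, if_true, if_neg (by omega : ¬ (1 = 0))]
      simp only [List.length_cons, List.drop_succ_cons]
      rw [go_m0]
      simp
  | cons c t ih =>
    cases fuel with
    | zero => omega
    | succ f =>
      rw [PySem.Chars.splitOnMax.go.eq_def]
      have hc : c ≠ ':' := fun hh => ha (hh ▸ List.mem_cons_self ..)
      have hp : [':'].isPrefixOf (c :: (t ++ ':' :: b)) = false := by
        simp [List.isPrefixOf]; exact fun hh => (hc hh.symm).elim
      simp only [List.cons_append, hp, Bool.false_eq_true, if_false, if_neg (by omega : ¬ (1 = 0))]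
      rw [ih (fun hh => ha (List.mem_cons_of_mem _ hh)) f (by simpa using Nat.lt_of_succ_lt_succ hf) (c :: cur)]
      simp

-- s.split(":", 1) when s has no colon
theorem pv_split1_nocolon (s : String) (h : ':' ∉ s.toList) :
    (PySem.Str.splitMax? s ":" 1).getD [] = [String.ofList s.toList] := by
  rw [PySem.Str.splitMax?]
  have : (":" : String).toList = [':'] := rfl
  rw [this, PySem.Chars.splitMax?]
  simp only [List.isEmpty_cons, if_false, Bool.false_eq_true]
  rw [PySem.Chars.splitOnMax, if_neg (by omega : ¬ ((1 : Int) < 0))]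
  have h1 : (1 : Int).toNat = 1 := rfl
  rw [h1, go_m1_nocolon s.toList h]
  simp

-- s.split(":", 1) when s = a ++ ":" ++ b with no colon in a
theorem pv_split1_colon (s : String) (a b : List Char) (hs : s.toList = a ++ ':' :: b) (ha : ':' ∉ a) :
    (PySem.Str.splitMax? s ":" 1).getD [] = [String.ofList a, String.ofList b] := by
  rw [PySem.Str.splitMax?]
  have : (":" : String).toList = [':'] := rfl
  rw [this, PySem.Chars.splitMax?]
  simp only [List.isEmpty_cons, if_false, Bool.false_eq_true]
  rw [PySem.Chars.splitOnMax, if_neg (by omega : ¬ ((1 : Int) < 0))]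
  have h1 : (1 : Int).toNat = 1 := rfl
  rw [h1, hs, go_m1_colon a ha b _ (by simp)]
  simp

-- prefix ending in the first colon pins down the head exactly
theorem pv_prefix_iff (p la lb : List Char) (hp : ':' ∉ p) (hla : ':' ∉ la) :
    ((p ++ [':']) <+: (la ++ ':' :: lb)) ↔ p = la := by
  constructor
  · intro h
    induction p generalizing la with
    | nil =>
      cases la with
      | nil => rfl
      | cons d u =>
        exfalso
        have h1 : ':' = d := by simpa using h
        exact hla (by rw [← h1]; exact List.mem_cons_self ..)
    | cons c t ih =>
      cases la with
      | nil =>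
        exfalso
        have h1 : c = ':' := ((by simpa using h : c = ':' ∧ t ++ [':'] <+: lb)).1
        exact hp (by rw [h1]; exact List.mem_cons_self ..)
      | cons d u =>
        obtain ⟨h1, h2⟩ := (by simpa using h : c = d ∧ t ++ [':'] <+: u ++ ':' :: lb)
        have ht := ih u (fun hh => hp (List.mem_cons_of_mem _ hh))
          (fun hh => hla (List.mem_cons_of_mem _ hh)) h2
        rw [h1, ht]
  · intro h; rw [h]; exact ⟨lb, by simp⟩

-- the startswith tests of A, on a line whose first colon splits it as a ++ ":" ++ b
theorem pv_sw (line : String) (a b : List Char) (hs : line.toList = a ++ ':' :: b) (ha : ':' ∉ a)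
    (p : String) (hd : List Char) (hp : p.toList = hd ++ [':']) (hhd : ':' ∉ hd) :
    PySem.Str.startswith (PySem.Str.lower line) p = (PySem.Chars.lower a == hd) := by
  rw [PySem.Str.startswith_eq, PySem.Str.toList_lower, hs, hp]
  have hlow : PySem.Chars.lower (a ++ ':' :: b) = PySem.Chars.lower a ++ ':' :: PySem.Chars.lower b := by
    simp [PySem.Chars.lower]; rfl
  rw [hlow]
  cases h : (PySem.Chars.lower a == hd) with
  | false =>
    refine Bool.eq_false_iff.mpr (fun hT => ?_)
    have h2 := (pv_prefix_iff hd _ (PySem.Chars.lower b) hhd (pv_colon_notmem_lower ha)).mp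
      ((PySem.Chars.startswith_iff _ _).mp hT)
    exact absurd (beq_iff_eq.mpr h2.symm) (by simp [h])
  | true =>
    rw [PySem.Chars.startswith_iff]
    exact (pv_prefix_iff hd _ _ hhd (pv_colon_notmem_lower ha)).mpr (beq_iff_eq.mp h).symm

theorem pv_lit_eq (y : String) (x : List Char) : (y = String.ofList x) ↔ (x = y.toList) := by
  constructor
  · intro h; rw [h, String.toList_ofList]
  · intro h; rw [h, String.ofList_toList]

theorem pv_lookup (x : List Char) : pvKeyByHead.get? (String.ofList x) =
    if x = "project name".toList then some "project_name"
    else if x = "project".toList then some "project_name"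
    else if x = "project number".toList then some "project_number"
    else if x = "project #".toList then some "project_number"
    else if x = "project no".toList then some "project_number"
    else if x = "location".toList then some "location"
    else if x = "owner".toList then some "owner"
    else if x = "gc".toList then some "gc"
    else if x = "general contractor".toList then some "gc"
    else none := by
  have hmk : pvKeyByHead = PySem.Dict.mk
    [("project name", "project_name"), ("project", "project_name"),
     ("project number", "project_number"), ("project #", "project_number"), ("project no", "project_number"),
     ("location", "location"), ("owner", "owner"),
     ("gc", "gc"), ("general contractor", "gc")] := by rfl
  rw [hmk]
  simp only [PySem.Dict.get?_mk_cons, beq_iff_eq, pv_lit_eq]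
  rfl

theorem pv_step_eq (md : PySem.Dict String String) (raw : String) :
    pvStepA md raw = pvStepB md raw := by
  simp only [pvStepA, pvStepB]
  by_cases hc : ':' ∈ (PySem.Str.strip raw).toList
  · -- line contains a colon: split it at the first one
    obtain ⟨a, b, hs, ha⟩ := List.eq_append_cons_of_mem hc
    have hIn : PySem.Str.isIn ":" (PySem.Str.strip raw) = true := by
      rw [PySem.Str.isIn_iff_infix]
      exact (List.singleton_infix_iff _ _).mpr hc
    have hval : ∀ pre, pvValA (PySem.Str.strip raw) pre = PySem.Str.strip (String.ofList b) := by
      intro pre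
      unfold pvValA
      rw [if_pos hIn, pv_split1_colon _ a b hs ha]
      rfl
    have hlowa : PySem.Str.lower (String.ofList a) = String.ofList (PySem.Chars.lower a) := by
      simp [PySem.Str.lower, String.toList_ofList]
    rw [pv_split1_colon _ a b hs ha,
        pv_sw _ a b hs ha "project name:" "project name".toList (by decide) (by decide),
        pv_sw _ a b hs ha "project:" "project".toList (by decide) (by decide),
        pv_sw _ a b hs ha "project number:" "project number".toList (by decide) (by decide),
        pv_sw _ a b hs ha "project #:" "project #".toList (by decide) (by decide),
        pv_sw _ a b hs ha "project no:" "project no".toList (by decide) (by decide),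
        pv_sw _ a b hs ha "location:" "location".toList (by decide) (by decide),
        pv_sw _ a b hs ha "owner:" "owner".toList (by decide) (by decide),
        pv_sw _ a b hs ha "gc:" "gc".toList (by decide) (by decide),
        pv_sw _ a b hs ha "general contractor:" "general contractor".toList (by decide) (by decide)]
    show _ = (match pvKeyByHead.get? (PySem.Str.lower (String.ofList a)) with
      | some k => md.insert k (PySem.Str.strip (String.ofList b))
      | none => md)
    rw [hlowa, pv_lookup]
    by_cases e1 : PySem.Chars.lower a = "project name".toList
    · simp [e1, hval]
    by_cases e2 : PySem.Chars.lower a = "project".toList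
    · simp [e2, hval]
    by_cases e3 : PySem.Chars.lower a = "project number".toList
    · simp [e3, hval]
    by_cases e4 : PySem.Chars.lower a = "project #".toList
    · simp [e4, hval]
    by_cases e5 : PySem.Chars.lower a = "project no".toList
    · simp [e5, hval]
    by_cases e6 : PySem.Chars.lower a = "location".toList
    · simp [e6, hval]
    by_cases e7 : PySem.Chars.lower a = "owner".toList
    · simp [e7, hval]
    by_cases e8 : PySem.Chars.lower a = "gc".toList
    · simp [e8, hval]
    by_cases e9 : PySem.Chars.lower a = "general contractor".toList
    · simp [e9, hval]
    · simp at e1 e2 e3 e4 e5 e6 e7 e8 e9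
      simp [e1, e2, e3, e4, e5, e6, e7, e8, e9]
  · -- no colon: every prefix test of A fails and B's split has a single part
    have hf : ∀ p : String, ':' ∈ p.toList →
        PySem.Str.startswith (PySem.Str.lower (PySem.Str.strip raw)) p = false := by
      intro p hp
      refine Bool.eq_false_iff.mpr (fun hT => ?_)
      have hpre : p.toList <+: (PySem.Str.lower (PySem.Str.strip raw)).toList := by
        rw [PySem.Str.startswith_eq] at hT
        exact (PySem.Chars.startswith_iff _ _).mp hT
      have hm : ':' ∈ (PySem.Str.lower (PySem.Str.strip raw)).toList := hpre.subset hp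
      rw [PySem.Str.toList_lower, PySem.Chars.lower, List.mem_map] at hm
      obtain ⟨c, hc2, hc3⟩ := hm
      exact hc ((pv_lowerChar_eq_colon hc3) ▸ hc2)
    rw [pv_split1_nocolon _ hc,
        hf "project name:" (by decide), hf "project:" (by decide),
        hf "project number:" (by decide), hf "project #:" (by decide), hf "project no:" (by decide),
        hf "location:" (by decide), hf "owner:" (by decide),
        hf "gc:" (by decide), hf "general contractor:" (by decide)]
    simp

-- ===== VERDICT (by name: the statement is the Claim_ definition above) =====
theorem extract_project_meta_py_spec : Claim_equal_extract_project_meta_py := by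
  intro text _
  unfold Spec_extract_project_meta_py extract_project_meta_py extract_project_meta_py_alt
  have hstep : pvStepA = pvStepB := funext fun m => funext fun r => pv_step_eq m r
  rw [hstep]
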